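-- pv_equiv track=rewrite | github.com/codybuell/advent-of-code | 2021/day-09/solution.py | spaces_around
-- ===== SOURCE A (Python) =====
-- import itertools
--
-- def spaces_around(coord: list, matrix: list) -> list:
--     """ Provides all spaces around a provided coordinate, constrained by the
--     edges of the 2 dimensional matrix. """
--
--     # set some ranges for edge detection
--     y_range = len(matrix) - 1
--     x_range = len(matrix[0]) - 1
--
--     # define how far out from coord we want to check
--     check_range = range(-1, 2)
--
--     # build a list of all locations around coordinate, account for edge limits on y and x dimensions
--     coords_around = [[min(y_range, max(0, coord[0] + y)), min(x_range, max(0, coord[1] + x))] for y in check_range for x in check_range]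
--
--     # sort and deduplicate them
--     coords_around.sort()
--     coords_around = [coords_around for coords_around, _ in itertools.groupby(coords_around)]
--
--     # in case we dont want to return the provided coordinate in the list
--     # coords_around.remove(coord)
--
--     return coords_around
-- ===== SOURCE B (Python) =====
-- def spaces_around(coord: list, matrix: list) -> list:
--     """Distinct in-bounds spaces around coord: clamp each axis independently,
--     dedup per axis, and take the Cartesian product (already in sorted order)."""
--     y_range = len(matrix) - 1
--     x_range = len(matrix[0]) - 1
--     ys = sorted({min(y_range, max(0, coord[0] + d)) for d in range(-1, 2)})
--     xs = sorted({min(x_range, max(0, coord[1] + d)) for d in range(-1, 2)})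
--     return [[y, x] for y in ys for x in xs]
-- ===== Notes on version B (the rewrite author's own statement) =====
-- stated objective: simpler
-- what changed: B clamps each axis independently, dedups and sorts the three candidate values per axis, and returns the Cartesian product directly, replacing A's build-9-pairs / sort / groupby-dedup pipeline.
import Mathlib
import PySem

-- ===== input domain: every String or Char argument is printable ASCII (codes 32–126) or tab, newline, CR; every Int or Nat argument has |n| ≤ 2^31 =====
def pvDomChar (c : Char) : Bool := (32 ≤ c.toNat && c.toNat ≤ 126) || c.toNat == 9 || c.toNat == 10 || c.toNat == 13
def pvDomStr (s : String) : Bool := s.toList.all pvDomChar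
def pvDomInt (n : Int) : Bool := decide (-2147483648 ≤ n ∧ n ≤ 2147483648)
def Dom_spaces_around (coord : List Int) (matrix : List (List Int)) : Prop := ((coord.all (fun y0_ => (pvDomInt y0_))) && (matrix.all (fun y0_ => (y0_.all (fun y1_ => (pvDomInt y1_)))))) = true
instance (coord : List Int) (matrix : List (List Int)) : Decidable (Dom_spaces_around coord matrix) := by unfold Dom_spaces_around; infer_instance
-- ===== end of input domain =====

-- B clamps each axis independently, dedups/sorts the three per-axis values and returns their
-- Cartesian product, replacing A's build-9-pairs / sort / groupby-dedup pipeline (simpler).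


-- ===== PORT A =====
-- Python's list.sort() on lists of ints: lexicographic order (Mathlib's LinearOrder on List Int)
def sortLL (xs : List (List Int)) : List (List Int) :=
  @PySem.List.sorted (List Int) (List Int) _ LinearOrder.toDecidableLT xs (fun x => x) false

def spaces_around (coord : List Int) (matrix : List (List Int)) : List (List Int) :=
  let y_range : Int := (matrix.length : Int) - 1
  let x_range : Int := ((PySem.List.pyGetD matrix 0 []).length : Int) - 1  -- matrix[0]; Pre_ gives matrix ≠ []
  let check : List Int := PySem.List.pyRange (-1) 2 1
  let coords_around : List (List Int) := check.flatMap (fun y => check.map (fun x =>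
      [min y_range (max 0 (PySem.List.pyGetD coord 0 0 + y)),
       min x_range (max 0 (PySem.List.pyGetD coord 1 0 + x))]))
  -- coords_around.sort(); [k for k, _ in itertools.groupby(coords_around)] = adjacent dedup
  (sortLL coords_around).destutter (· ≠ ·)

-- ===== PORT B =====
def clampedAxis (r c : Int) : List Int :=
  PySem.List.sorted (PySem.Set.ofList ((PySem.List.pyRange (-1) 2 1).map
    (fun d => min r (max 0 (c + d))))) (fun x => x)

def spaces_around_alt (coord : List Int) (matrix : List (List Int)) : List (List Int) :=
  let y_range : Int := (matrix.length : Int) - 1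
  let x_range : Int := ((PySem.List.pyGetD matrix 0 []).length : Int) - 1
  let ys := clampedAxis y_range (PySem.List.pyGetD coord 0 0)
  let xs := clampedAxis x_range (PySem.List.pyGetD coord 1 0)
  ys.flatMap (fun y => xs.map (fun x => [y, x]))

-- ===== PRECONDITION & SPEC =====
-- A raises IndexError on matrix == [] (matrix[0]) and on coord shorter than 2 (coord[0]/coord[1]);
-- B raises there too. Pre_ excludes exactly those inputs.
def Pre_spaces_around (coord : List Int) (matrix : List (List Int)) : Prop :=
  matrix ≠ [] ∧ 2 ≤ coord.length
instance (coord : List Int) (matrix : List (List Int)) : Decidable (Pre_spaces_around coord matrix) := by unfold Pre_spaces_around; infer_instance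

def pvWitness_spaces_around : List Int × List (List Int) := ([1, 1], [[1, 2, 3], [4, 5, 6], [7, 8, 9]])

def Spec_spaces_around (coord : List Int) (matrix : List (List Int)) (out : List (List Int)) : Prop := out = spaces_around_alt coord matrix
instance (coord : List Int) (matrix : List (List Int)) (out : List (List Int)) : Decidable (Spec_spaces_around coord matrix out) := by unfold Spec_spaces_around; infer_instance

-- ===== CLAIM (what is proved, stated in full; the proofs are below) =====
def Claim_equal_spaces_around : Prop := ∀ (coord : List Int) (matrix : List (List Int)), Dom_spaces_around coord matrix → Pre_spaces_around coord matrix → Spec_spaces_around coord matrix (spaces_around coord matrix)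

-- ===== LEMMAS AND PROOFS =====

theorem clampedAxis_pairwise (r c : Int) : (clampedAxis r c).Pairwise (· < ·) :=
  PySem.List.sorted_ofList_pairwise_lt _

theorem mem_clampedAxis (r c y : Int) :
    y ∈ clampedAxis r c ↔ ∃ d ∈ PySem.List.pyRange (-1) 2 1, y = min r (max 0 (c + d)) := by
  simp [clampedAxis, PySem.List.mem_sorted, PySem.Set.mem_ofList, List.mem_map, eq_comm]

theorem prod_pairwise (ys xs : List Int) (hy : ys.Pairwise (· < ·)) (hx : xs.Pairwise (· < ·)) :
    (ys.flatMap (fun y => xs.map (fun x => ([y, x] : List Int)))).Pairwise (· < ·) := by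
  induction ys with
  | nil => simp
  | cons y ys ih =>
    rw [List.flatMap_cons, List.pairwise_append]
    refine ⟨?_, ih (List.Pairwise.of_cons hy), ?_⟩
    · rw [List.pairwise_map]
      exact hx.imp (fun h => List.Lex.cons (List.Lex.rel h))
    · intro a ha b hb
      simp only [List.mem_map, List.mem_flatMap] at ha hb
      obtain ⟨x1, -, rfl⟩ := ha
      obtain ⟨y2, hy2, x2, -, rfl⟩ := hb
      exact List.Lex.rel ((List.pairwise_cons.mp hy).1 y2 hy2)

theorem main_lemma (Y X c0 c1 : Int) :
    ((sortLL ((PySem.List.pyRange (-1) 2 1).flatMap (fun y => (PySem.List.pyRange (-1) 2 1).map (fun x =>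
        [min Y (max 0 (c0 + y)), min X (max 0 (c1 + x))])))).destutter (· ≠ ·))
    = (clampedAxis Y c0).flatMap (fun y => (clampedAxis X c1).map (fun x => [y, x])) := by
  set L9 : List (List Int) := ((PySem.List.pyRange (-1) 2 1).flatMap (fun y => (PySem.List.pyRange (-1) 2 1).map (fun x =>
        [min Y (max 0 (c0 + y)), min X (max 0 (c1 + x))]))) with hL9
  have hsp : (sortLL L9).Pairwise (fun a b : List Int => a ≤ b) := PySem.List.sorted_pairwise _ _
  rw [hsp.destutter_eq_dedup]
  have hlt : ((sortLL L9).dedup).Pairwise (fun a b : List Int => a < b) :=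
    ((List.Pairwise.sublist (List.dedup_sublist _) hsp).and (List.nodup_dedup _)).imp
      (fun h => lt_of_le_of_ne h.1 h.2)
  have hrlt := prod_pairwise _ _ (clampedAxis_pairwise Y c0) (clampedAxis_pairwise X c1)
  refine List.Perm.eq_of_pairwise (le := fun a b : List Int => a < b)
    (fun a b _ _ h1 h2 => absurd h1 (lt_asymm h2)) hlt hrlt ?_
  refine (List.perm_ext_iff_of_nodup (hlt.imp ne_of_lt) (hrlt.imp ne_of_lt)).mpr (fun a => ?_)
  simp only [hL9, List.mem_dedup, sortLL, PySem.List.mem_sorted, List.mem_flatMap, List.mem_map,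
    mem_clampedAxis]
  constructor
  · rintro ⟨dy, hdy, dx, hdx, rfl⟩
    exact ⟨_, ⟨dy, hdy, rfl⟩, _, ⟨dx, hdx, rfl⟩, rfl⟩
  · rintro ⟨y, ⟨dy, hdy, rfl⟩, x, ⟨dx, hdx, rfl⟩, rfl⟩
    exact ⟨dy, hdy, dx, hdx, rfl⟩

-- ===== VERDICT (by name: the statement is the Claim_ definition above) =====
theorem spaces_around_spec : Claim_equal_spaces_around := by
  intro coord matrix _ _
  unfold Spec_spaces_around spaces_around spaces_around_alt
  exact main_lemma _ _ _ _
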